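-- pv_equiv track=rewrite | github.com/TheTerrarian03/Stickies | Old Versions/Stickies 2.1/Stickies (old)/functions.py | findLongestLenBeforeNewline
-- ===== SOURCE A (Python) =====
-- def findLongestLenBeforeNewline(string):
--   longestLen = 0
--   currLen = 0
--   for char in string:
--     if char != "\n":
--       currLen += 1
--     else:
--       if currLen > longestLen:
--         longestLen = currLen
--       currLen = 0
--   return longestLen
-- ===== SOURCE B (Python) =====
-- def findLongestLenBeforeNewline(string):
--     # split into segments; the run after the last newline is ignored (as in A), hence [:-1]
--     return max((len(seg) for seg in string.split("\n")[:-1]), default=0)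
-- ===== Notes on version B (the rewrite author's own statement) =====
-- stated objective: idiomatic
-- what changed: Replaced the manual running-length/running-max character loop by split-on-newline, drop the trailing segment, and take the max segment length with default 0.
import Mathlib
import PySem

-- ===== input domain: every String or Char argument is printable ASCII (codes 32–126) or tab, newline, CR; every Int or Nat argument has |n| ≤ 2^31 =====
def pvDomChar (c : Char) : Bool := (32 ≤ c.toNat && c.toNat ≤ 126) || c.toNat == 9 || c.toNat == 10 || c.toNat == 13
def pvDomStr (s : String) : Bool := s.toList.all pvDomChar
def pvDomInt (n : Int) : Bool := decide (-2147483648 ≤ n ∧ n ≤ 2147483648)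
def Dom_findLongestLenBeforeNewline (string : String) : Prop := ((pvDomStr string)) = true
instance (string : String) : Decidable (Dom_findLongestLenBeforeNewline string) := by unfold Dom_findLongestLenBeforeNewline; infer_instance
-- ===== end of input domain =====

-- B replaces A's manual running-length/running-max loop by split-on-newline,
-- drop the trailing segment, and max of segment lengths (default 0); same cost, more idiomatic.


-- ===== PORT A =====
def findLongestLenBeforeNewline (string : String) : Int :=
  (string.toList.foldl
    (fun (st : Int × Int) char =>
      if char ≠ '\n' then (st.1, st.2 + 1)
      else (if st.2 > st.1 then st.2 else st.1, 0))
    (0, 0)).1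

-- ===== PORT B =====
-- '.split("\n")' → PySem.Chars.splitOn (sep ≠ ""); '[:-1]' on a list → dropLast (exact for
-- every list); 'max(..., default=0)' over the (nonnegative) lengths → foldl max 0.
def findLongestLenBeforeNewline_alt (string : String) : Int :=
  (((PySem.Chars.splitOn string.toList ['\n']).dropLast).map
    (fun seg => (seg.length : Int))).foldl max 0

-- ===== PRECONDITION & SPEC =====
def Spec_findLongestLenBeforeNewline (string : String) (out : Int) : Prop := out = findLongestLenBeforeNewline_alt string
instance (string : String) (out : Int) : Decidable (Spec_findLongestLenBeforeNewline string out) := by unfold Spec_findLongestLenBeforeNewline; infer_instance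

-- ===== CLAIM (what is proved, stated in full; the proofs are below) =====
def Claim_equal_findLongestLenBeforeNewline : Prop := ∀ (string : String), Dom_findLongestLenBeforeNewline string → Spec_findLongestLenBeforeNewline string (findLongestLenBeforeNewline string)

-- ===== LEMMAS AND PROOFS =====

-- common characterisation: max length of a completed (newline-terminated) run,
-- the current run having length c already
def pvRunMax (c : Int) : List Char → Int
  | [] => 0
  | x :: t => if x = '\n' then max c (pvRunMax 0 t) else pvRunMax (c + 1) t

theorem pvFoldMax_ge (xs : List Int) (a : Int) : a ≤ xs.foldl max a := by
  induction xs generalizing a with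
  | nil => simp
  | cons x t ih => simpa using le_trans (le_max_left a x) (ih (max a x))

theorem pvA_loop (l : List Char) (L c : Int) (hL : 0 ≤ L) (hc : 0 ≤ c) :
    (l.foldl
      (fun (st : Int × Int) char =>
        if char ≠ '\n' then (st.1, st.2 + 1)
        else (if st.2 > st.1 then st.2 else st.1, 0))
      (L, c)).1 = max L (pvRunMax c l) := by
  induction l generalizing L c with
  | nil => simp [pvRunMax, max_eq_left hL]
  | cons x t ih =>
    by_cases hx : x = '\n'
    · subst hx
      simp only [List.foldl_cons, ne_eq, not_true_eq_false, if_false]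
      rw [ih _ _ (by split_ifs <;> omega) le_rfl]
      rw [show pvRunMax c ('\n' :: t) = max c (pvRunMax 0 t) from by simp [pvRunMax]]
      generalize pvRunMax 0 t = r
      split_ifs <;> omega
    · simp only [List.foldl_cons, hx, ne_eq, not_false_eq_true, if_true]
      rw [show pvRunMax c (x :: t) = pvRunMax (c + 1) t from by simp [pvRunMax, hx],
        ih L (c + 1) hL (by omega)]

theorem pvGo_spec (fuel : Nat) (l cur : List Char) (acc : List (List Char)) (h : l.length < fuel) :
    ((((PySem.Chars.splitOn.go ['\n'] fuel l cur acc).dropLast).map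
        (fun seg => (seg.length : Int))).foldl max 0)
      = max ((acc.reverse.map (fun seg => (seg.length : Int))).foldl max 0)
            (pvRunMax cur.length l) := by
  induction fuel generalizing l cur acc with
  | zero => omega
  | succ fuel ih =>
    cases l with
    | nil =>
      simp only [PySem.Chars.splitOn.go, pvRunMax]
      rw [List.reverse_cons, List.dropLast_concat]
      rw [max_eq_left (pvFoldMax_ge _ _)]
    | cons x t =>
      by_cases hx : x = '\n'
      · subst hx
        have hpre : List.isPrefixOf ['\n'] ('\n' :: t) = true := by
          simp [List.isPrefixOf]
        simp only [PySem.Chars.splitOn.go, hpre, if_true, List.length_cons, List.length_nil,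
          List.drop_succ_cons, List.drop_zero]
        rw [ih t [] (cur.reverse :: acc) (by simpa using Nat.lt_of_succ_lt_succ h)]
        simp only [List.reverse_cons, List.map_append, List.map_cons,
          List.map_nil, List.length_nil, List.length_reverse]
        rw [show pvRunMax (↑cur.length) ('\n' :: t) = max (↑cur.length) (pvRunMax 0 t) from by
          simp [pvRunMax]]
        rw [List.foldl_append]
        simp only [List.foldl_cons, List.foldl_nil, Nat.cast_zero]
        generalize (List.map (fun seg => (seg.length : Int)) acc.reverse).foldl max 0 = M
        generalize pvRunMax 0 t = r
        omega
      · have hpre : List.isPrefixOf ['\n'] (x :: t) = false := by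
          simp [List.isPrefixOf]
          intro hc; exact absurd hc.symm hx
        simp only [PySem.Chars.splitOn.go, hpre, if_false, Bool.false_eq_true]
        rw [ih t (x :: cur) acc (by simpa using Nat.lt_of_succ_lt_succ h)]
        rw [show pvRunMax (↑cur.length) (x :: t) = pvRunMax (↑cur.length + 1) t from by
          simp [pvRunMax, hx]]
        congr 2

-- ===== VERDICT (by name: the statement is the Claim_ definition above) =====
theorem findLongestLenBeforeNewline_spec : Claim_equal_findLongestLenBeforeNewline := by
  intro s _
  unfold Spec_findLongestLenBeforeNewline findLongestLenBeforeNewline findLongestLenBeforeNewline_alt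
  rw [pvA_loop s.toList 0 0 le_rfl le_rfl]
  unfold PySem.Chars.splitOn
  rw [pvGo_spec (s.toList.length + 1) s.toList [] [] (by omega)]
  simp
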